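-- pv_equiv track=rewrite | github.com/itumor/LV-exam | scripts/regenerate_exam_audio_elevenlabs.py | strip_audio_markup
-- ===== SOURCE A (Python) =====
-- def strip_audio_markup(lines: list[str]) -> list[str]:
--     cleaned: list[str] = []
--     in_audio = False
--     for line in lines:
--         stripped = line.strip()
--         if stripped.startswith("<audio"):
--             in_audio = True
--             continue
--         if in_audio:
--             if stripped == "</audio>":
--                 in_audio = False
--             continue
--         if stripped.startswith("[Audio failsafe link]"):
--             continue
--         if stripped.startswith("!["):
--             continue
--         cleaned.append(line)
--     return cleaned
-- ===== SOURCE B (Python) =====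
-- def strip_audio_markup(lines: list[str]) -> list[str]:
--     cleaned: list[str] = []
--     i = 0
--     n = len(lines)
--     while i < n:
--         stripped = lines[i].strip()
--         if stripped.startswith("<audio"):
--             # consume the whole audio block, including its closing tag
--             i += 1
--             while i < n and lines[i].strip() != "</audio>":
--                 i += 1
--             if i < n:
--                 i += 1
--             continue
--         if stripped.startswith("[Audio failsafe link]") or stripped.startswith("!["):
--             i += 1
--             continue
--         cleaned.append(lines[i])
--         i += 1
--     return cleaned
-- ===== Notes on version B (the rewrite author's own statement) =====
-- stated objective: alternative
-- what changed: Replaces the carried in_audio boolean flag with an index-based loop that consumes an entire <audio>...</audio> block in a nested inner while, so no cross-iteration state is kept.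
import Mathlib
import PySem

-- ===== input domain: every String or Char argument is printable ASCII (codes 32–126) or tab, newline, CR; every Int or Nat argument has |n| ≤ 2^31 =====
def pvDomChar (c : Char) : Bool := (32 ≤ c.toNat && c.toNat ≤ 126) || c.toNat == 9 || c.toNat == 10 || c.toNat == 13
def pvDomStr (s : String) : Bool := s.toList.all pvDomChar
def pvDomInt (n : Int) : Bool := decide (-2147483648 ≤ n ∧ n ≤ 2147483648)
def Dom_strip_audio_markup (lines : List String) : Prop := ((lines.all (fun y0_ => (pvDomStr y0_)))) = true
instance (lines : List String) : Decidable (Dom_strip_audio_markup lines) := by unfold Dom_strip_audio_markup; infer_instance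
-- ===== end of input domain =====

-- B replaces A's carried in_audio flag with an index-free nested consumption of each
-- <audio>…</audio> block (objective: alternative decomposition, same cost).


-- ===== PORT A =====
-- one loop iteration of A: state = (cleaned, in_audio)
def stripAudioStepA (st : List String × Bool) (line : String) : List String × Bool :=
  let stripped := PySem.Str.strip line
  if PySem.Str.startswith stripped "<audio" then (st.1, true)
  else if st.2 then (if stripped == "</audio>" then (st.1, false) else st)
  else if PySem.Str.startswith stripped "[Audio failsafe link]" then st
  else if PySem.Str.startswith stripped "![" then st
  else (st.1 ++ [line], st.2)

def strip_audio_markup (lines : List String) : List String :=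
  (lines.foldl stripAudioStepA ([], false)).1

-- ===== PORT B =====
-- inner while of B: drop lines up to and including the first whose strip is "</audio>"
def skipAudioBlock : List String → List String
  | [] => []
  | l :: rest => if PySem.Str.strip l == "</audio>" then rest else skipAudioBlock rest

theorem skipAudioBlock_length_le (xs : List String) :
    (skipAudioBlock xs).length ≤ xs.length := by
  induction xs with
  | nil => simp [skipAudioBlock]
  | cons l rest ih =>
      simp only [skipAudioBlock]
      split
      · simp
      · exact Nat.le_succ_of_le ih

-- outer while of B, carrying the cleaned accumulator
def stripAudioGoB (acc : List String) (lines : List String) : List String :=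
  match lines with
  | [] => acc
  | l :: rest =>
      let stripped := PySem.Str.strip l
      if PySem.Str.startswith stripped "<audio" then
        stripAudioGoB acc (skipAudioBlock rest)
      else if PySem.Str.startswith stripped "[Audio failsafe link]"
              || PySem.Str.startswith stripped "![" then
        stripAudioGoB acc rest
      else
        stripAudioGoB (acc ++ [l]) rest
termination_by lines.length
decreasing_by
  · exact Nat.lt_succ_of_le (skipAudioBlock_length_le rest)
  · exact Nat.lt_succ_self _
  · exact Nat.lt_succ_self _

def strip_audio_markup_alt (lines : List String) : List String :=
  stripAudioGoB [] lines

-- ===== PRECONDITION & SPEC =====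
def Spec_strip_audio_markup (lines : List String) (out : List String) : Prop := out = strip_audio_markup_alt lines
instance (lines : List String) (out : List String) : Decidable (Spec_strip_audio_markup lines out) := by unfold Spec_strip_audio_markup; infer_instance

-- ===== CLAIM (what is proved, stated in full; the proofs are below) =====
def Claim_equal_strip_audio_markup : Prop := ∀ (lines : List String), Dom_strip_audio_markup lines → Spec_strip_audio_markup lines (strip_audio_markup lines)

-- ===== LEMMAS AND PROOFS =====

-- a line whose strip starts with "<audio" cannot strip to "</audio>"
theorem not_close_of_open {s : String}
    (h : PySem.Str.startswith s "<audio" = true) : (s == "</audio>") = false := by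
  by_cases hs : s = "</audio>"
  · rw [hs] at h; exact absurd h (by decide)
  · simpa using hs

-- A in the in_audio state behaves like skipping the rest of the block
theorem foldl_true_eq (lines : List String) (acc : List String) :
    (lines.foldl stripAudioStepA (acc, true)).1
      = ((skipAudioBlock lines).foldl stripAudioStepA (acc, false)).1 := by
  induction lines generalizing acc with
  | nil => simp [skipAudioBlock]
  | cons l rest ih =>
      simp only [List.foldl_cons, skipAudioBlock]
      by_cases h1 : PySem.Str.startswith (PySem.Str.strip l) "<audio" = true
      · rw [stripAudioStepA]
        simp only [h1, if_pos, not_close_of_open h1]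
        exact ih acc
      · by_cases h2 : (PySem.Str.strip l == "</audio>") = true
        · rw [stripAudioStepA]
          simp only [h1, h2]
          simp
        · rw [stripAudioStepA]
          simp only [h1, h2, Bool.false_eq_true, if_false]
          exact ih acc

-- A in the normal state equals B's outer loop
theorem foldl_false_eq (lines : List String) (acc : List String) :
    (lines.foldl stripAudioStepA (acc, false)).1 = stripAudioGoB acc lines := by
  induction hn : lines.length using Nat.strong_induction_on generalizing lines acc with
  | _ n ih =>
    match lines, hn with
    | [], _ => simp [stripAudioGoB]
    | l :: rest, hn =>
      simp only [List.foldl_cons, stripAudioGoB]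
      by_cases h1 : PySem.Str.startswith (PySem.Str.strip l) "<audio" = true
      · rw [stripAudioStepA]
        simp only [h1, if_true]
        rw [foldl_true_eq rest acc]
        exact ih ((skipAudioBlock rest).length)
          (by subst hn; exact Nat.lt_succ_of_le (skipAudioBlock_length_le rest)) _ _ rfl
      · by_cases h2 : PySem.Str.startswith (PySem.Str.strip l) "[Audio failsafe link]" = true
        · rw [stripAudioStepA]
          simp only [h1, h2, Bool.false_eq_true, if_false, Bool.true_or, if_pos]
          exact ih rest.length (by subst hn; exact Nat.lt_succ_self _) _ _ rfl
        · by_cases h3 : PySem.Str.startswith (PySem.Str.strip l) "![" = true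
          · rw [stripAudioStepA]
            simp only [h1, h2, h3, Bool.false_eq_true, if_false, Bool.or_true, if_pos]
            exact ih rest.length (by subst hn; exact Nat.lt_succ_self _) _ _ rfl
          · rw [stripAudioStepA]
            simp only [h1, h2, h3, Bool.false_eq_true, if_false]
            rw [if_neg (by simp)]
            exact ih rest.length (by subst hn; exact Nat.lt_succ_self _) _ _ rfl

-- ===== VERDICT (by name: the statement is the Claim_ definition above) =====
theorem strip_audio_markup_spec : Claim_equal_strip_audio_markup := by
  intro lines _
  show strip_audio_markup lines = strip_audio_markup_alt lines
  unfold strip_audio_markup strip_audio_markup_alt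
  exact foldl_false_eq lines []
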